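-- pv_equiv track=rewrite | github.com/David-Durst/aetherling | tests/test_native_line_buffer.py | expected_valid_outputs_1D
-- ===== SOURCE A (Python) =====
-- from itertools import chain
--
-- def expected_valid_outputs_1D(
--     in_arrays,
--     pixels_per_clock: int,
--     window_width: int,
--     image_size: int,
--     output_stride: int,
--     origin: int
-- ):
--     """Given 1D line buffer parameters and a list of lists of pixel
--     values representing the stream of input (one entry = one clock
--     cycles' array-of-pixels input), return a list-of-lists-of-lists of
--     values (None for garbage) representing outputs on cycles where the
--     linebuffer asserts valid, in the order:
--         outer dimension :  time
--         middle dimension:  list of windows (parallelism)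
--         inner dimension :  pixels within a window
--     """
--     stride = output_stride
--     if len(in_arrays) * pixels_per_clock != image_size:
--         raise Exception(
--             "Expected in_arrays length of %g"
--                  % (image_size/pixels_per_clock)
--             + f" for pixels_per_clock {pixels_per_clock}"
--             + f" and image_size {image_size}."
--         )
--     # index -> pixel
--     pixel_dict = {i:b for i,b in enumerate(chain(*in_arrays))}
--
--     window_count, parallelism, valid_count = internal_params_1D(
--         pixels_per_clock, window_width, image_size, output_stride, origin
--     )
--
--     expected= \
--     [
--         [
--             [
--                 pixel_dict.get(window_offset + pixel_offset)
--                 for pixel_offset in range(window_width)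
--             ]
--             for window_offset # index of left pixel of window.
--             in range(origin + parallelism * stride * time_idx,
--                      origin + parallelism * stride * (1+time_idx),
--                      stride)
--         ]
--         for time_idx in range(valid_count)
--     ]
--     return expected
--
-- def internal_params_1D(
--     pixels_per_clock: int,
--     window_width: int,
--     image_size: int,
--     output_stride: int,
--     origin: int
-- ):
--     """Calculate "internal" parameters of linebuffer based on user parameters.
--
--     This includes the window_count (number of total windows outputted),
--     the parallelism (width of the output bus in number of windows),
--     and the valid_count (number of times valid should be asserted).
--
--     Return as tuple (window_count, parallelism, valid_count).
--     """
--     stride = output_stride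
--
--     # Total number of windows outputted.
--     window_count = image_size//stride
--
--     # Number of parallel window outputs.
--     parallelism = pixels_per_clock//stride
--     if parallelism == 0:
--         parallelism = 1
--     else:
--         assert parallelism*stride == pixels_per_clock, \
--             "Expected integer throughput (stride evenly dividing px/clk)."
--
--     # Number of times valid should be asserted.
--     valid_count = window_count//parallelism
--     assert valid_count * parallelism == window_count, \
--         "Expected window count (img/stride) to be divisible by parallelism " \
--         "(px/clk / stride)"
--
--     return window_count, parallelism, valid_count
-- ===== SOURCE B (Python) =====
-- from itertools import chain
--
-- def internal_params_1D(
--     pixels_per_clock: int,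
--     window_width: int,
--     image_size: int,
--     output_stride: int,
--     origin: int
-- ):
--     stride = output_stride
--     window_count = image_size//stride
--     parallelism = pixels_per_clock//stride
--     if parallelism == 0:
--         parallelism = 1
--     else:
--         assert parallelism*stride == pixels_per_clock, \
--             "Expected integer throughput (stride evenly dividing px/clk)."
--     valid_count = window_count//parallelism
--     assert valid_count * parallelism == window_count, \
--         "Expected window count (img/stride) to be divisible by parallelism " \
--         "(px/clk / stride)"
--     return window_count, parallelism, valid_count
--
-- def expected_valid_outputs_1D(
--     in_arrays,
--     pixels_per_clock: int,
--     window_width: int,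
--     image_size: int,
--     output_stride: int,
--     origin: int
-- ):
--     stride = output_stride
--     if len(in_arrays) * pixels_per_clock != image_size:
--         raise Exception(
--             "Expected in_arrays length of %g"
--                  % (image_size/pixels_per_clock)
--             + f" for pixels_per_clock {pixels_per_clock}"
--             + f" and image_size {image_size}."
--         )
--     # flat pixel stream; out-of-range lookups are None (no dict needed)
--     pixels = list(chain(*in_arrays))
--
--     def lookup(idx):
--         return pixels[idx] if 0 <= idx < len(pixels) else None
--
--     window_count, parallelism, valid_count = internal_params_1D(
--         pixels_per_clock, window_width, image_size, output_stride, origin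
--     )
--
--     # build ALL windows as one flat list indexed by global window number,
--     # then reshape into the time dimension by slicing.
--     flat = [
--         [lookup(origin + stride*g + p) for p in range(window_width)]
--         for g in range(window_count)
--     ]
--     return [flat[t*parallelism:(t+1)*parallelism] for t in range(valid_count)]
-- ===== Notes on version B (the rewrite author's own statement) =====
-- stated objective: alternative
-- what changed: B drops A's enumerate-built pixel dict in favour of direct guarded indexing into the flattened pixel list, and replaces A's nested per-cycle stepped-range window generation by building one flat list of all windows by global window index and then reshaping it into the time dimension with list slicing.
import Mathlib
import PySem

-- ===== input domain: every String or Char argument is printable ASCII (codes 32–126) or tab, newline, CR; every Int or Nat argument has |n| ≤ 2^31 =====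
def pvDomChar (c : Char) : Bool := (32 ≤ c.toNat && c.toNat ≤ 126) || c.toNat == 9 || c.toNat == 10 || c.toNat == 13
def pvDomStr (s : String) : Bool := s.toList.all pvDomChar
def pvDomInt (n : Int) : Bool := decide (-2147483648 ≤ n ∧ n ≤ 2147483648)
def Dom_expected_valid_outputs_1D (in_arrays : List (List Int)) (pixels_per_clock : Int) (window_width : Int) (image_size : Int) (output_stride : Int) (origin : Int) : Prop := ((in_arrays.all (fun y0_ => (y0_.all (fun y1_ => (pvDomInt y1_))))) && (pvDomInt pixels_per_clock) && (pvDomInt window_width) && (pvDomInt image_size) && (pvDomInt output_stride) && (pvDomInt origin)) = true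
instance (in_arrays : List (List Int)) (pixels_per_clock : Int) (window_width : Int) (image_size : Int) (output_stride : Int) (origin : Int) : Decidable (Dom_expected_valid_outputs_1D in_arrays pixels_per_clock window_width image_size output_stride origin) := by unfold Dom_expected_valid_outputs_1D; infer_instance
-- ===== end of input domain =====

-- ===== PORT A =====
-- B re-groups the computation: one flat list of all windows with direct list
-- indexing (no dict), then reshaped into the time dimension by slicing;
-- objective: alternative (same cost, dict-free decomposition).

-- shared helper: Python's internal_params_1D (both Source A and Source B call it);
-- none = the Python raises (ZeroDivisionError or a failed assert)
def internal_params_1D (pixels_per_clock : Int) (window_width : Int) (image_size : Int) (output_stride : Int) (origin : Int) : Option (Int × Int × Int) :=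
  if output_stride = 0 then none
  else
    let window_count := PySem.Int.floordiv image_size output_stride
    let parallelism0 := PySem.Int.floordiv pixels_per_clock output_stride
    let parallelism := if parallelism0 = 0 then 1 else parallelism0
    if parallelism0 ≠ 0 ∧ parallelism0 * output_stride ≠ pixels_per_clock then none
    else
      let valid_count := PySem.Int.floordiv window_count parallelism
      if valid_count * parallelism ≠ window_count then none
      else some (window_count, parallelism, valid_count)

-- A's pixel_dict = {i: b for i, b in enumerate(chain(*in_arrays))}
def pvPixelDict (xs : List Int) : PySem.Dict Int Int :=
  (PySem.List.enumerate xs 0).foldl (fun d p => d.insert p.1 p.2) PySem.Dict.empty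

-- port of A ([] on the branches where the Python raises; Pre_ excludes them)
def expected_valid_outputs_1D (in_arrays : List (List Int)) (pixels_per_clock : Int) (window_width : Int) (image_size : Int) (output_stride : Int) (origin : Int) : List (List (List (Option Int))) :=
  if (in_arrays.length : Int) * pixels_per_clock ≠ image_size then []
  else
    match internal_params_1D pixels_per_clock window_width image_size output_stride origin with
    | none => []
    | some (_, parallelism, valid_count) =>
      (PySem.List.pyRange 0 valid_count 1).map (fun time_idx =>
        (PySem.List.pyRange (origin + parallelism * output_stride * time_idx)
            (origin + parallelism * output_stride * (1 + time_idx)) output_stride).map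
          (fun window_offset =>
            (PySem.List.pyRange 0 window_width 1).map
              (fun pixel_offset => (pvPixelDict in_arrays.flatten).get? (window_offset + pixel_offset))))

-- ===== PORT B =====
-- B's lookup: pixels[idx] if 0 <= idx < len(pixels) else None
def pvLookup (xs : List Int) (idx : Int) : Option Int :=
  if 0 ≤ idx ∧ idx < (xs.length : Int) then PySem.List.pyGet? xs idx else none

def expected_valid_outputs_1D_alt (in_arrays : List (List Int)) (pixels_per_clock : Int) (window_width : Int) (image_size : Int) (output_stride : Int) (origin : Int) : List (List (List (Option Int))) :=
  if (in_arrays.length : Int) * pixels_per_clock ≠ image_size then []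
  else
    match internal_params_1D pixels_per_clock window_width image_size output_stride origin with
    | none => []
    | some (window_count, parallelism, valid_count) =>
      let flat := (PySem.List.pyRange 0 window_count 1).map (fun g =>
        (PySem.List.pyRange 0 window_width 1).map (fun p =>
          pvLookup in_arrays.flatten (origin + output_stride * g + p)))
      (PySem.List.pyRange 0 valid_count 1).map (fun t =>
        PySem.List.slice flat (some (t * parallelism)) (some ((t + 1) * parallelism)))

-- ===== PRECONDITION & SPEC =====
-- Pre_ = exactly the inputs where the Python A returns: the in_arrays-length
-- check passes, the stride is nonzero, and both asserts of internal_params_1D hold.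
def Pre_expected_valid_outputs_1D (in_arrays : List (List Int)) (pixels_per_clock : Int) (window_width : Int) (image_size : Int) (output_stride : Int) (origin : Int) : Prop :=
  (in_arrays.length : Int) * pixels_per_clock = image_size ∧ output_stride ≠ 0 ∧
  (PySem.Int.floordiv pixels_per_clock output_stride = 0 ∨
   PySem.Int.floordiv pixels_per_clock output_stride * output_stride = pixels_per_clock) ∧
  PySem.Int.floordiv (PySem.Int.floordiv image_size output_stride)
      (if PySem.Int.floordiv pixels_per_clock output_stride = 0 then 1
       else PySem.Int.floordiv pixels_per_clock output_stride)
    * (if PySem.Int.floordiv pixels_per_clock output_stride = 0 then 1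
       else PySem.Int.floordiv pixels_per_clock output_stride)
    = PySem.Int.floordiv image_size output_stride
instance (in_arrays : List (List Int)) (pixels_per_clock : Int) (window_width : Int) (image_size : Int) (output_stride : Int) (origin : Int) : Decidable (Pre_expected_valid_outputs_1D in_arrays pixels_per_clock window_width image_size output_stride origin) := by unfold Pre_expected_valid_outputs_1D; infer_instance

def pvWitness_expected_valid_outputs_1D : List (List Int) × Int × Int × Int × Int × Int :=
  ([[1, 2], [3, 4]], 2, 3, 4, 1, -1)

def Spec_expected_valid_outputs_1D (in_arrays : List (List Int)) (pixels_per_clock : Int) (window_width : Int) (image_size : Int) (output_stride : Int) (origin : Int) (out : List (List (List (Option Int)))) : Prop := out = expected_valid_outputs_1D_alt in_arrays pixels_per_clock window_width image_size output_stride origin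
instance (in_arrays : List (List Int)) (pixels_per_clock : Int) (window_width : Int) (image_size : Int) (output_stride : Int) (origin : Int) (out : List (List (List (Option Int)))) : Decidable (Spec_expected_valid_outputs_1D in_arrays pixels_per_clock window_width image_size output_stride origin out) := by unfold Spec_expected_valid_outputs_1D; infer_instance

-- ===== CLAIM (what is proved, stated in full; the proofs are below) =====
def Claim_equal_expected_valid_outputs_1D : Prop := ∀ (in_arrays : List (List Int)) (pixels_per_clock : Int) (window_width : Int) (image_size : Int) (output_stride : Int) (origin : Int), Dom_expected_valid_outputs_1D in_arrays pixels_per_clock window_width image_size output_stride origin → Pre_expected_valid_outputs_1D in_arrays pixels_per_clock window_width image_size output_stride origin → Spec_expected_valid_outputs_1D in_arrays pixels_per_clock window_width image_size output_stride origin (expected_valid_outputs_1D in_arrays pixels_per_clock window_width image_size output_stride origin)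

-- ===== LEMMAS AND PROOFS =====

-- A's enumerate-built dict looks up exactly like B's guarded direct index
lemma pvDict_get_gen (xs : List Int) (d : PySem.Dict Int Int) (s idx : Int) :
    ((PySem.List.enumerate xs s).foldl (fun d p => d.insert p.1 p.2) d).get? idx
      = if s ≤ idx ∧ idx < s + (xs.length : Int) then PySem.List.pyGet? xs (idx - s) else d.get? idx := by
  induction xs generalizing s d with
  | nil =>
    rw [PySem.List.enumerate_nil]
    simp only [List.foldl_nil, List.length_nil]
    split_ifs with h
    · exfalso; omega
    · rfl
  | cons x xs ih =>
    rw [PySem.List.enumerate_cons]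
    simp only [List.foldl_cons]
    rw [ih, PySem.Dict.get?_insert]
    by_cases h1 : s + 1 ≤ idx ∧ idx < s + 1 + (xs.length : Int)
    · rw [if_pos h1, if_pos (by simp only [List.length_cons]; push_cast; omega)]
      have hn : idx - (s + 1) = (((idx - (s + 1)).toNat : Nat) : Int) := by omega
      have hm : idx - s = ((((idx - (s + 1)).toNat + 1 : Nat)) : Int) := by omega
      rw [hn, PySem.List.pyGet?_natCast, hm, PySem.List.pyGet?_natCast]
      simp
    · rw [if_neg h1]
      by_cases h2 : idx = s
      · rw [if_pos h2, if_pos (by simp only [List.length_cons]; push_cast; omega)]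
        have : idx - s = ((0 : Nat) : Int) := by omega
        rw [this, PySem.List.pyGet?_natCast]
        simp
      · rw [if_neg h2, if_neg (by simp only [List.length_cons]; push_cast at h1 ⊢; omega)]

lemma pvDict_eq_lookup (xs : List Int) (idx : Int) :
    (pvPixelDict xs).get? idx = pvLookup xs idx := by
  unfold pvPixelDict pvLookup
  rw [pvDict_get_gen]
  simp only [PySem.Dict.get?_empty, zero_add, sub_zero]

-- pyRange a (a + p*s) s, any step s ≠ 0, is p evenly spaced points (none if p ≤ 0)
lemma pvRange_affine (a p s : Int) (hs : s ≠ 0) :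
    PySem.List.pyRange a (a + p * s) s = (List.range p.toNat).map (fun n : Nat => a + s * (n : Int)) := by
  have key : ∀ q : Int, 0 < q → (q - 1 + p * q) / q = p := by
    intro q hq
    rw [Int.add_mul_ediv_right _ _ (by omega), Int.ediv_eq_zero_of_lt (by omega) (by omega)]
    ring
  unfold PySem.List.pyRange
  rw [if_neg hs]
  rcases lt_or_gt_of_ne hs with hneg | hpos
  · rw [if_neg (by omega)]
    by_cases hp : 0 < p
    · rw [if_pos (by nlinarith)]
      have hc : (a - (a + p * s) + -s - 1) / -s = p := by
        rw [show a - (a + p * s) + -s - 1 = (-s - 1) + p * (-s) by ring]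
        exact key (-s) (by omega)
      rw [hc]
    · rw [if_neg (by intro h; nlinarith), show p.toNat = 0 by omega]
  · rw [if_pos hpos]
    by_cases hp : 0 < p
    · rw [if_pos (by nlinarith)]
      have hc : (a + p * s - a + s - 1) / s = p := by
        rw [show a + p * s - a + s - 1 = (s - 1) + p * s by ring]
        exact key s hpos
      rw [hc]
    · rw [if_neg (by intro h; nlinarith), show p.toNat = 0 by omega]

-- slicing a mapped range is the mapped sub-range
lemma pvSlice_map_range {α : Type} (f : Nat → α) (M : Nat) (a b : Int)
    (ha : 0 ≤ a) (hab : a ≤ b) (hbM : b ≤ (M : Int)) :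
    PySem.List.slice ((List.range M).map f) (some a) (some b)
      = (List.range (b - a).toNat).map (fun k => f (a.toNat + k)) := by
  rw [PySem.List.slice_toNat _ ha (le_trans ha hab)]
  apply List.ext_getElem
  · simp; omega
  · intro i h1 h2
    simp only [List.getElem_take, List.getElem_drop, List.getElem_map, List.getElem_range]

lemma pvSlice_nil {α : Type} (a b : Int) :
    PySem.List.slice ([] : List α) (some a) (some b) = [] := by
  simp [PySem.List.slice, PySem.List.clampIdx]

lemma internal_params_spec (ppc ww img s org wc p vc : Int)
    (h : internal_params_1D ppc ww img s org = some (wc, p, vc)) :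
    s ≠ 0 ∧ p ≠ 0 ∧ vc * p = wc := by
  simp only [internal_params_1D] at h
  split_ifs at h with h1 h2 h3 h4 h5 h6 <;>
    (simp only [Option.some.injEq, Prod.mk.injEq] at h
     obtain ⟨hwc, hp, hvc⟩ := h
     subst hwc; subst hp; subst hvc
     exact ⟨h1, by first | omega | tauto, by first | omega | tauto⟩)

-- ===== VERDICT (by name: the statement is the Claim_ definition above) =====
theorem expected_valid_outputs_1D_spec : Claim_equal_expected_valid_outputs_1D := by
  intro in_arrays ppc ww img s org _hdom hpre
  unfold Spec_expected_valid_outputs_1D expected_valid_outputs_1D expected_valid_outputs_1D_alt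
  rw [if_neg (by simpa using hpre.1), if_neg (by simpa using hpre.1)]
  rcases hip : internal_params_1D ppc ww img s org with _ | ⟨wc, p, vc⟩
  · rfl
  · obtain ⟨hs, hp, hvcp⟩ := internal_params_spec ppc ww img s org wc p vc hip
    simp only [pvDict_eq_lookup]
    apply List.map_congr_left
    intro t ht
    rw [PySem.List.mem_pyRange_one] at ht
    set xs := in_arrays.flatten with hxs
    by_cases hp1 : 1 ≤ p
    · -- main case: p windows per valid cycle
      have hA : PySem.List.pyRange (org + p * s * t) (org + p * s * (1 + t)) s
          = (List.range p.toNat).map (fun n : Nat => (org + p * s * t) + s * (n : Int)) := by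
        rw [show org + p * s * (1 + t) = (org + p * s * t) + p * s by ring]
        exact pvRange_affine _ p s hs
      have hflat : (PySem.List.pyRange 0 wc 1).map
            (fun g => (PySem.List.pyRange 0 ww 1).map (fun po => pvLookup xs (org + s * g + po)))
          = (List.range wc.toNat).map
            (fun n : Nat => (PySem.List.pyRange 0 ww 1).map (fun po => pvLookup xs (org + s * (n : Int) + po))) := by
        simp only [PySem.List.pyRange_one, sub_zero, List.map_map]
        apply List.map_congr_left
        intro k _
        simp
      rw [hA, hflat, List.map_map]
      have htp : 0 ≤ t * p := mul_nonneg ht.1 (by omega)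
      have htp2 : t * p ≤ (t + 1) * p := by nlinarith
      have hbM : (t + 1) * p ≤ wc := by
        rw [← hvcp]
        have : t + 1 ≤ vc := by omega
        nlinarith
      have hwcnn : (0 : Int) ≤ wc := by nlinarith
      rw [pvSlice_map_range _ wc.toNat (t * p) ((t + 1) * p) htp htp2 (by rw [Int.toNat_of_nonneg hwcnn]; exact hbM)]
      rw [show (t + 1) * p - t * p = p from by ring]
      apply List.map_congr_left
      intro k _
      apply List.map_congr_left
      intro po _
      congr 1
      have : ((t * p).toNat : Int) = t * p := Int.toNat_of_nonneg htp
      push_cast [this]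
      ring
    · -- degenerate case p ≤ -1: every row is empty on both sides
      have hp2 : p ≤ -1 := by omega
      have hwc : wc < 0 := by nlinarith [ht.1, ht.2]
      have hA : PySem.List.pyRange (org + p * s * t) (org + p * s * (1 + t)) s = [] := by
        rw [show org + p * s * (1 + t) = (org + p * s * t) + p * s by ring,
          pvRange_affine _ p s hs, show p.toNat = 0 by omega]
        rfl
      have hflat : PySem.List.pyRange 0 wc 1 = [] :=
        PySem.List.pyRange_one_eq_nil (by omega)
      rw [hA, hflat]
      simp [pvSlice_nil]
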